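-- pv_equiv track=rewrite | github.com/jiangshaoqi/killG4inMrna | gcSlicer.py | get_rna_candidate
-- ===== SOURCE A (Python) =====
-- protein_rna_mapping = {"M": ["AUG"],  # Met
--                        "T": ["ACA", "ACC", "ACG", "ACU"],  # Thr: AC4
--                        "N": ["AAC", "AAU"],  # Asn: AA2
--                        "K": ["AAA", "AAG"],  # Lys: AA2
--                        # Ser: AG2, UC4
--                        "S": ["AGC", "AGU", "UCA", "UCC", "UCG", "UCU"],
--                        # Arg: AG2, CG4
--                        "R": ["AGA", "AGG", "CGA", "CGC", "CGG", "CGU"],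
--                        # Val: GU4
--                        "V": ["GUA", "GUC", "GUG", "GUU"],
--                        # Ala: GC4
--                        "A": ["GCA", "GCC", "GCG", "GCU"],
--                        "D": ["GAC", "GAU"],  # Asp: GA2
--                        "E": ["GAA", "GAG"],  # Glu: GA2
--                        # Gly: GG4
--                        "G": ["GGA", "GGC", "GGG", "GGU"],
--                        "F": ["UUC", "UUU"],  # Phe: UU2
--                        # Leu: UU2, CU4
--                        "L": ["UUA", "UUG", "CUA", "CUC", "CUG", "CUU"],
--                        "Y": ["UAC", "UAU"],  # Tyr: UA2
--                        "C": ["UGC", "UGU"],  # Cys: UG2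
--                        "W": ["UGG"],  # Trp: UGG
--                        # Pro: CC4
--                        "P": ["CCA", "CCC", "CCG", "CCU"],
--                        "H": ["CAC", "CAU"],  # His: CA2
--                        "Q": ["CAA", "CAG"],  # Gln: CA2
--                        "I": ["AUA", "AUC", "AUU"],  # Ile: AU3
--                        # Sec: UA2, UGA
--                        "*": ["UAA", "UAG", "UGA"]
--                        }
--
-- def get_rna_candidate(protein, replace_idx, origin_rna):
--     # replace_idx: 0, 1 or 2 最佳替换点在三个对应蛋白质的三个rna的位置
--     # origin_r: 原本该位置的rna
--     c1 = None
--     c2 = None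
--     c3 = None
--     c4 = None
--     c5 = None
--     c6 = None
--     if origin_rna[replace_idx] == 'C':
--         complement_r = 'G'
--     else:
--         complement_r = 'C'
--     candidate_list = protein_rna_mapping[protein]
--     if replace_idx == 0:
--         for candidate in candidate_list:
--             if candidate[0] == 'A' or candidate[0] == 'U':
--                 c1 = candidate
--             if candidate[1] == 'A' or candidate[1] == 'U':
--                 c2 = candidate
--             if candidate[2] == 'A' or candidate[2] == 'U':
--                 c3 = candidate
--             if candidate[0] == complement_r:
--                 c4 = candidate
--             if candidate[1] == complement_r:
--                 c5 = candidate
--             if candidate[2] == complement_r: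
--                 c6 = candidate
--     if replace_idx == 1:
--         for candidate in candidate_list:
--             if candidate[1] == 'A' or candidate[1] == 'U':
--                 c1 = candidate
--             if candidate[0] == 'A' or candidate[0] == 'U':
--                 c2 = candidate
--             if candidate[2] == 'A' or candidate[2] == 'U':
--                 c3 = candidate
--             if candidate[1] == complement_r:
--                 c4 = candidate
--             if candidate[0] == complement_r:
--                 c5 = candidate
--             if candidate[2] == complement_r:
--                 c6 = candidate
--     if replace_idx == 2:
--         for candidate in candidate_list:
--             if candidate[2] == 'A' or candidate[2] == 'U':
--                 c1 = candidate
--             if candidate[1] == 'A' or candidate[1] == 'U':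
--                 c2 = candidate
--             if candidate[0] == 'A' or candidate[0] == 'U':
--                 c3 = candidate
--             if candidate[2] == complement_r:
--                 c4 = candidate
--             if candidate[1] == complement_r:
--                 c5 = candidate
--             if candidate[0] == complement_r:
--                 c6 = candidate
--     if c1:
--         return c1
--     if c2:
--         return c2
--     if c3:
--         return c3
--     if c4:
--         return c4
--     if c5:
--         return c5
--     if c6:
--         return c6
--     return origin_rna
-- ===== SOURCE B (Python) =====
-- protein_rna_mapping = {"M": ["AUG"],  # Met
--                        "T": ["ACA", "ACC", "ACG", "ACU"],  # Thr: AC4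
--                        "N": ["AAC", "AAU"],  # Asn: AA2
--                        "K": ["AAA", "AAG"],  # Lys: AA2
--                        "S": ["AGC", "AGU", "UCA", "UCC", "UCG", "UCU"],
--                        "R": ["AGA", "AGG", "CGA", "CGC", "CGG", "CGU"],
--                        "V": ["GUA", "GUC", "GUG", "GUU"],
--                        "A": ["GCA", "GCC", "GCG", "GCU"],
--                        "D": ["GAC", "GAU"],  # Asp: GA2
--                        "E": ["GAA", "GAG"],  # Glu: GA2
--                        "G": ["GGA", "GGC", "GGG", "GGU"],
--                        "F": ["UUC", "UUU"],  # Phe: UU2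
--                        "L": ["UUA", "UUG", "CUA", "CUC", "CUG", "CUU"],
--                        "Y": ["UAC", "UAU"],  # Tyr: UA2
--                        "C": ["UGC", "UGU"],  # Cys: UG2
--                        "W": ["UGG"],  # Trp: UGG
--                        "P": ["CCA", "CCC", "CCG", "CCU"],
--                        "H": ["CAC", "CAU"],  # His: CA2
--                        "Q": ["CAA", "CAG"],  # Gln: CA2
--                        "I": ["AUA", "AUC", "AUU"],  # Ile: AU3
--                        "*": ["UAA", "UAG", "UGA"]
--                        }
--
-- _PRIORITY = {0: [0, 1, 2], 1: [1, 0, 2], 2: [2, 1, 0]}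
--
-- def _last_match(candidates, pos, chars):
--     last = None
--     for candidate in candidates:
--         if candidate[pos] in chars:
--             last = candidate
--     return last
--
-- def get_rna_candidate(protein, replace_idx, origin_rna):
--     complement_r = 'G' if origin_rna[replace_idx] == 'C' else 'C'
--     candidates = protein_rna_mapping[protein]
--     priority = _PRIORITY.get(replace_idx, [])
--     for chars in (('A', 'U'), (complement_r,)):
--         for pos in priority:
--             hit = _last_match(candidates, pos, chars)
--             if hit is not None:
--                 return hit
--     return origin_rna
-- ===== Notes on version B (the rewrite author's own statement) =====
-- stated objective: simpler
-- what changed: Replaces A's three duplicated per-index loops maintaining six candidate variables (c1..c6) plus a six-way return chain by a position-priority list and two parametrized last-match passes (A/U first, then complement) with early return.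
import Mathlib
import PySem

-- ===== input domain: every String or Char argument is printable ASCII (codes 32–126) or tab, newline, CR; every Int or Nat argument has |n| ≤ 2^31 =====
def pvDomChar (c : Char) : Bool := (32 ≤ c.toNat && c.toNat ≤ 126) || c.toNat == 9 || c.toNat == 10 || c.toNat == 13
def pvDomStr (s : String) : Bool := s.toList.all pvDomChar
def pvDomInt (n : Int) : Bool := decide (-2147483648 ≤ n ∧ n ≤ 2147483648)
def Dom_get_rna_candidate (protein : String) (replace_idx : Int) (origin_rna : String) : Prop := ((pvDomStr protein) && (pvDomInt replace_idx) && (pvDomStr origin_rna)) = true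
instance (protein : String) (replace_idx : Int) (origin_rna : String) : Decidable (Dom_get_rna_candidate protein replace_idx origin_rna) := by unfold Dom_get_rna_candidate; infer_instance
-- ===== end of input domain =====

-- B replaces A's three duplicated loops over six cN variables by two parametrized last-match
-- passes over a position-priority list (objective: simpler); return value only, no mutation.

-- the module-level protein→codon table, shared context of both programs
def proteinRnaMapping : PySem.Dict String (List String) :=
  PySem.Dict.ofList
    [("M", ["AUG"]),
     ("T", ["ACA", "ACC", "ACG", "ACU"]),
     ("N", ["AAC", "AAU"]),
     ("K", ["AAA", "AAG"]),
     ("S", ["AGC", "AGU", "UCA", "UCC", "UCG", "UCU"]),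
     ("R", ["AGA", "AGG", "CGA", "CGC", "CGG", "CGU"]),
     ("V", ["GUA", "GUC", "GUG", "GUU"]),
     ("A", ["GCA", "GCC", "GCG", "GCU"]),
     ("D", ["GAC", "GAU"]),
     ("E", ["GAA", "GAG"]),
     ("G", ["GGA", "GGC", "GGG", "GGU"]),
     ("F", ["UUC", "UUU"]),
     ("L", ["UUA", "UUG", "CUA", "CUC", "CUG", "CUU"]),
     ("Y", ["UAC", "UAU"]),
     ("C", ["UGC", "UGU"]),
     ("W", ["UGG"]),
     ("P", ["CCA", "CCC", "CCG", "CCU"]),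
     ("H", ["CAC", "CAU"]),
     ("Q", ["CAA", "CAG"]),
     ("I", ["AUA", "AUC", "AUU"]),
     ("*", ["UAA", "UAG", "UGA"])]

-- ===== PORT A =====

-- state of A's loop: the six candidate slots (c1, c2, c3, c4, c5, c6)
abbrev S6 := Option String × Option String × Option String × Option String × Option String × Option String

-- Python's 'if c1: return c1; if c2: …; return origin_rna' chain (a set cN is returned
-- only if truthy, i.e. a nonempty string)
def firstTruthy : List (Option String) → String → String
  | [], d => d
  | none :: rest, d => firstTruthy rest d
  | some s :: rest, d => if s = "" then firstTruthy rest d else s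

def get_rna_candidate (protein : String) (replace_idx : Int) (origin_rna : String) : String :=
  match PySem.Str.pyGet? origin_rna replace_idx with
  | none => origin_rna   -- Python raises IndexError here; excluded by Pre_
  | some ch =>
    let complement_r : Char := if ch = 'C' then 'G' else 'C'
    match proteinRnaMapping.get? protein with
    | none => origin_rna -- Python raises KeyError here; excluded by Pre_
    | some candidate_list =>
      let s0 : S6 := (none, none, none, none, none, none)
      let s1 : S6 :=
        if replace_idx = 0 then
          candidate_list.foldl (fun (s : S6) candidate =>
            (if (PySem.Str.pyGet? candidate 0 == some 'A' || PySem.Str.pyGet? candidate 0 == some 'U') then some candidate else s.1,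
             if (PySem.Str.pyGet? candidate 1 == some 'A' || PySem.Str.pyGet? candidate 1 == some 'U') then some candidate else s.2.1,
             if (PySem.Str.pyGet? candidate 2 == some 'A' || PySem.Str.pyGet? candidate 2 == some 'U') then some candidate else s.2.2.1,
             if PySem.Str.pyGet? candidate 0 == some complement_r then some candidate else s.2.2.2.1,
             if PySem.Str.pyGet? candidate 1 == some complement_r then some candidate else s.2.2.2.2.1,
             if PySem.Str.pyGet? candidate 2 == some complement_r then some candidate else s.2.2.2.2.2)) s0
        else s0
      let s2 : S6 :=
        if replace_idx = 1 then
          candidate_list.foldl (fun (s : S6) candidate =>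
            (if (PySem.Str.pyGet? candidate 1 == some 'A' || PySem.Str.pyGet? candidate 1 == some 'U') then some candidate else s.1,
             if (PySem.Str.pyGet? candidate 0 == some 'A' || PySem.Str.pyGet? candidate 0 == some 'U') then some candidate else s.2.1,
             if (PySem.Str.pyGet? candidate 2 == some 'A' || PySem.Str.pyGet? candidate 2 == some 'U') then some candidate else s.2.2.1,
             if PySem.Str.pyGet? candidate 1 == some complement_r then some candidate else s.2.2.2.1,
             if PySem.Str.pyGet? candidate 0 == some complement_r then some candidate else s.2.2.2.2.1,
             if PySem.Str.pyGet? candidate 2 == some complement_r then some candidate else s.2.2.2.2.2)) s1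
        else s1
      let s3 : S6 :=
        if replace_idx = 2 then
          candidate_list.foldl (fun (s : S6) candidate =>
            (if (PySem.Str.pyGet? candidate 2 == some 'A' || PySem.Str.pyGet? candidate 2 == some 'U') then some candidate else s.1,
             if (PySem.Str.pyGet? candidate 1 == some 'A' || PySem.Str.pyGet? candidate 1 == some 'U') then some candidate else s.2.1,
             if (PySem.Str.pyGet? candidate 0 == some 'A' || PySem.Str.pyGet? candidate 0 == some 'U') then some candidate else s.2.2.1,
             if PySem.Str.pyGet? candidate 2 == some complement_r then some candidate else s.2.2.2.1,
             if PySem.Str.pyGet? candidate 1 == some complement_r then some candidate else s.2.2.2.2.1,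
             if PySem.Str.pyGet? candidate 0 == some complement_r then some candidate else s.2.2.2.2.2)) s2
        else s2
      firstTruthy [s3.1, s3.2.1, s3.2.2.1, s3.2.2.2.1, s3.2.2.2.2.1, s3.2.2.2.2.2] origin_rna

-- ===== PORT B =====

-- B's helper _last_match: last candidate whose char at pos is in chars
def lastMatch (candidates : List String) (pos : Int) (chars : List Char) : Option String :=
  candidates.foldl (fun last candidate =>
    if (PySem.Str.pyGet? candidate pos).any (fun c => chars.contains c) then some candidate else last) none

-- B's inner 'for pos in priority: … return hit' loop
def scanPrio (candidates : List String) (priority : List Int) (chars : List Char) : Option String :=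
  match priority with
  | [] => none
  | p :: ps =>
    match lastMatch candidates p chars with
    | some hit => some hit
    | none => scanPrio candidates ps chars

-- B's outer 'for chars in (AU, complement): …' loop
def scanCharsets (candidates : List String) (priority : List Int) (charsets : List (List Char)) : Option String :=
  match charsets with
  | [] => none
  | cs :: rest =>
    match scanPrio candidates priority cs with
    | some hit => some hit
    | none => scanCharsets candidates priority rest

def get_rna_candidate_alt (protein : String) (replace_idx : Int) (origin_rna : String) : String :=
  match PySem.Str.pyGet? origin_rna replace_idx with
  | none => origin_rna   -- Python raises IndexError here; excluded by Pre_
  | some ch =>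
    let complement_r : Char := if ch = 'C' then 'G' else 'C'
    match proteinRnaMapping.get? protein with
    | none => origin_rna -- Python raises KeyError here; excluded by Pre_
    | some candidates =>
      let priority : List Int :=
        if replace_idx = 0 then [0, 1, 2]
        else if replace_idx = 1 then [1, 0, 2]
        else if replace_idx = 2 then [2, 1, 0]
        else []
      match scanCharsets candidates priority [['A', 'U'], [complement_r]] with
      | some hit => hit
      | none => origin_rna

-- ===== PRECONDITION & SPEC =====
-- Pre_ excludes exactly the raising inputs: replace_idx out of Python-index range for
-- origin_rna (IndexError) and protein not a key of the table (KeyError).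
def Pre_get_rna_candidate (protein : String) (replace_idx : Int) (origin_rna : String) : Prop :=
  PySem.Raise.InRange origin_rna.toList.length replace_idx ∧
  protein ∈ ["M", "T", "N", "K", "S", "R", "V", "A", "D", "E", "G",
             "F", "L", "Y", "C", "W", "P", "H", "Q", "I", "*"]
instance (protein : String) (replace_idx : Int) (origin_rna : String) : Decidable (Pre_get_rna_candidate protein replace_idx origin_rna) := by unfold Pre_get_rna_candidate; infer_instance

def pvWitness_get_rna_candidate : String × Int × String := ("T", 1, "ACG")

def Spec_get_rna_candidate (protein : String) (replace_idx : Int) (origin_rna : String) (out : String) : Prop := out = get_rna_candidate_alt protein replace_idx origin_rna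
instance (protein : String) (replace_idx : Int) (origin_rna : String) (out : String) : Decidable (Spec_get_rna_candidate protein replace_idx origin_rna out) := by unfold Spec_get_rna_candidate; infer_instance

-- ===== CLAIM (what is proved, stated in full; the proofs are below) =====
def Claim_equal_get_rna_candidate : Prop := ∀ (protein : String) (replace_idx : Int) (origin_rna : String), Dom_get_rna_candidate protein replace_idx origin_rna → Pre_get_rna_candidate protein replace_idx origin_rna → Spec_get_rna_candidate protein replace_idx origin_rna (get_rna_candidate protein replace_idx origin_rna)

-- ===== LEMMAS AND PROOFS =====

-- the one-slot last-match fold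
def lastFold (f : String → Bool) (a : Option String) (cl : List String) : Option String :=
  cl.foldl (fun a c => if f c then some c else a) a

-- first set slot, no truthiness test (what B's early returns compute)
def firstSomeD : List (Option String) → String → String
  | [], d => d
  | none :: rest, d => firstSomeD rest d
  | some s :: _, _ => s

-- A's six-slot fold splits into six independent last-match folds
theorem fold6_split (cl : List String) (f1 f2 f3 f4 f5 f6 : String → Bool)
    (a1 a2 a3 a4 a5 a6 : Option String) :
    cl.foldl (fun (s : S6) c =>
        (if f1 c then some c else s.1,
         if f2 c then some c else s.2.1,
         if f3 c then some c else s.2.2.1,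
         if f4 c then some c else s.2.2.2.1,
         if f5 c then some c else s.2.2.2.2.1,
         if f6 c then some c else s.2.2.2.2.2)) (a1, a2, a3, a4, a5, a6)
      = (lastFold f1 a1 cl, lastFold f2 a2 cl, lastFold f3 a3 cl,
         lastFold f4 a4 cl, lastFold f5 a5 cl, lastFold f6 a6 cl) := by
  induction cl generalizing a1 a2 a3 a4 a5 a6 with
  | nil => rfl
  | cons c cl ih => simp only [List.foldl_cons, lastFold] at *; rw [ih]

-- a last-match fold yields its start value or a member of the list
theorem lastFold_mem (cl : List String) (f : String → Bool) (a : Option String) :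
    ∀ s, lastFold f a cl = some s → a = some s ∨ s ∈ cl := by
  induction cl generalizing a with
  | nil => intro s hs; exact Or.inl hs
  | cons c cl ih =>
    intro s hs
    simp only [lastFold, List.foldl_cons] at hs
    rcases ih (if f c then some c else a) s hs with h | h
    · split at h
      · exact Or.inr (by simp_all)
      · exact Or.inl h
    · exact Or.inr (List.mem_cons_of_mem _ h)

-- A's membership test equals B's: x == 'A' or x == 'U'  vs  x in ('A','U')
theorem test_AU (o : Option Char) :
    (o == some 'A' || o == some 'U') = o.any (fun c => ['A', 'U'].contains c) := by
  cases o with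
  | none => rfl
  | some c =>
    show (c == 'A' || c == 'U') = (['A', 'U'].contains c)
    rw [List.contains_cons, List.contains_cons, List.contains_nil, Bool.or_false]

-- x == comp  vs  x in (comp,)
theorem test_singleton (o : Option Char) (comp : Char) :
    (o == some comp) = o.any (fun c => [comp].contains c) := by
  cases o with
  | none => rfl
  | some c =>
    show (c == comp) = ([comp].contains c)
    rw [List.contains_cons, List.contains_nil, Bool.or_false]

-- A's truthiness chain equals the plain first-set chain when every set slot is nonempty
theorem firstTruthy_eq_firstSomeD (l : List (Option String)) (d : String)
    (h : ∀ s, some s ∈ l → s ≠ "") :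
    firstTruthy l d = firstSomeD l d := by
  induction l with
  | nil => rfl
  | cons o rest ih =>
    cases o with
    | none => simpa [firstTruthy, firstSomeD] using ih fun s hs => h s (List.mem_cons_of_mem _ hs)
    | some s =>
      have hs : s ≠ "" := h s List.mem_cons_self
      simp [firstTruthy, firstSomeD, hs]

-- B's early-return scan over one priority permutation is the first-set chain of last-matches
theorem scan_eq (cl : List String) (i1 i2 i3 : Int) (comp : Char) (d : String) :
    (match scanCharsets cl [i1, i2, i3] [['A', 'U'], [comp]] with
     | some hit => hit
     | none => d)
      = firstSomeD
          [lastMatch cl i1 ['A', 'U'], lastMatch cl i2 ['A', 'U'], lastMatch cl i3 ['A', 'U'],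
           lastMatch cl i1 [comp], lastMatch cl i2 [comp], lastMatch cl i3 [comp]] d := by
  simp only [scanCharsets, scanPrio]
  rcases lastMatch cl i1 ['A', 'U'] with _ | s <;>
    rcases lastMatch cl i2 ['A', 'U'] with _ | s <;>
    rcases lastMatch cl i3 ['A', 'U'] with _ | s <;>
    rcases lastMatch cl i1 [comp] with _ | s <;>
    rcases lastMatch cl i2 [comp] with _ | s <;>
    rcases lastMatch cl i3 [comp] with _ | s <;>
    rfl

-- core equivalence for one priority permutation, over any candidate list of nonempty strings
theorem core_eq (cl : List String) (hne : ∀ c ∈ cl, c ≠ "")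
    (i1 i2 i3 : Int) (comp : Char) (d : String) :
    firstTruthy
      (let st := cl.foldl (fun (s : S6) candidate =>
        (if (PySem.Str.pyGet? candidate i1 == some 'A' || PySem.Str.pyGet? candidate i1 == some 'U') then some candidate else s.1,
         if (PySem.Str.pyGet? candidate i2 == some 'A' || PySem.Str.pyGet? candidate i2 == some 'U') then some candidate else s.2.1,
         if (PySem.Str.pyGet? candidate i3 == some 'A' || PySem.Str.pyGet? candidate i3 == some 'U') then some candidate else s.2.2.1,
         if PySem.Str.pyGet? candidate i1 == some comp then some candidate else s.2.2.2.1,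
         if PySem.Str.pyGet? candidate i2 == some comp then some candidate else s.2.2.2.2.1,
         if PySem.Str.pyGet? candidate i3 == some comp then some candidate else s.2.2.2.2.2))
        (none, none, none, none, none, none)
       [st.1, st.2.1, st.2.2.1, st.2.2.2.1, st.2.2.2.2.1, st.2.2.2.2.2]) d
      = (match scanCharsets cl [i1, i2, i3] [['A', 'U'], [comp]] with
         | some hit => hit
         | none => d) := by
  have hAU : ∀ i : Int, (fun c : String => (PySem.Str.pyGet? c i == some 'A' || PySem.Str.pyGet? c i == some 'U'))
      = fun c : String => (PySem.Str.pyGet? c i).any (fun x => ['A', 'U'].contains x) := by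
    intro i; funext c; exact test_AU _
  have hC : ∀ i : Int, (fun c : String => (PySem.Str.pyGet? c i == some comp))
      = fun c : String => (PySem.Str.pyGet? c i).any (fun x => [comp].contains x) := by
    intro i; funext c; exact test_singleton _ comp
  have hlm : ∀ (i : Int) (cs : List Char),
      lastFold (fun c : String => (PySem.Str.pyGet? c i).any (fun x => cs.contains x)) none cl
        = lastMatch cl i cs := fun _ _ => rfl
  simp only [fold6_split]
  rw [hAU i1, hAU i2, hAU i3, hC i1, hC i2, hC i3, hlm, hlm, hlm, hlm, hlm, hlm, scan_eq]
  apply firstTruthy_eq_firstSomeD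
  intro s hs
  have hm : ∀ (i : Int) (cs : List Char), lastMatch cl i cs = some s → s ∈ cl := by
    intro i cs h
    rcases lastFold_mem cl _ none s h with h' | h'
    · exact absurd h' (by simp)
    · exact h'
  simp only [List.mem_cons, List.not_mem_nil, or_false] at hs
  rcases hs with h | h | h | h | h | h <;> exact hne s (hm _ _ h.symm)

-- the two ports agree whenever the protein is a key of the table
theorem ports_eq (protein : String) (replace_idx : Int) (origin_rna : String)
    (cl : List String) (hcl : proteinRnaMapping.get? protein = some cl)
    (hne : ∀ c ∈ cl, c ≠ "") :
    get_rna_candidate protein replace_idx origin_rna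
      = get_rna_candidate_alt protein replace_idx origin_rna := by
  unfold get_rna_candidate get_rna_candidate_alt
  cases h : PySem.Str.pyGet? origin_rna replace_idx with
  | none => rfl
  | some ch =>
    simp only [hcl]
    by_cases h0 : replace_idx = 0
    · subst h0
      simpa using core_eq cl hne 0 1 2 (if ch = 'C' then 'G' else 'C') origin_rna
    · by_cases h1 : replace_idx = 1
      · subst h1
        simpa using core_eq cl hne 1 0 2 (if ch = 'C' then 'G' else 'C') origin_rna
      · by_cases h2 : replace_idx = 2
        · subst h2
          simpa using core_eq cl hne 2 1 0 (if ch = 'C' then 'G' else 'C') origin_rna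
        · simp [h0, h1, h2, firstTruthy, scanCharsets, scanPrio]

-- ===== VERDICT (by name: the statement is the Claim_ definition above) =====
theorem get_rna_candidate_spec : Claim_equal_get_rna_candidate := by
  intro protein replace_idx origin_rna _ hPre
  unfold Spec_get_rna_candidate
  obtain ⟨_, hKey⟩ := hPre
  fin_cases hKey <;> exact ports_eq _ _ _ _ rfl (by decide)
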